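-- pv_equiv track=rewrite | github.com/jengzang/dialects-backend | app/service/logging/utils/path_templates.py | normalize_route_path
-- ===== SOURCE A (Python) =====
-- from typing import Iterable
--
-- PATH_TEMPLATES: list[tuple[str, str]] = [
--     ("/admin/sessions/user/", "{user_id}"),
--     ("/admin/sessions/revoke-user/", "{user_id}"),
--     ("/admin/sessions/revoke/", "{token_id}"),
--     ("/admin/user-sessions/user/", "{user_id}"),
--     ("/admin/user-sessions/revoke-user/", "{user_id}"),
--     ("/admin/user-sessions/", "{session_id}"),
--     ("/admin/ip/", "{api_name}/{ip}"),
--     ("/api/tools/check/download/", "{task_id}"),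
--     ("/api/tools/jyut2ipa/download/", "{task_id}"),
--     ("/api/tools/jyut2ipa/progress/", "{task_id}"),
--     ("/api/tools/merge/download/", "{task_id}"),
--     ("/api/tools/merge/progress/", "{task_id}"),
--     ("/api/tools/praat/jobs/progress/", "{job_id}"),
--     ("/api/tools/praat/uploads/progress/", "{task_id}"),
--     ("/api/villages/admin/run-ids/active/", "{analysis_type}"),
--     ("/api/villages/admin/run-ids/available/", "{analysis_type}"),
--     ("/api/villages/admin/run-ids/metadata/", "{run_id}"),
--     ("/api/villages/village/complete/", "{village_id}"),
--     ("/api/villages/village/features/", "{village_id}"),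
--     ("/api/villages/village/ngrams/", "{village_id}"),
--     ("/api/villages/village/semantic-structure/", "{village_id}"),
--     ("/api/villages/village/spatial-features/", "{village_id}"),
--     ("/api/villages/semantic/subcategory/chars/", "{subcategory}"),
--     ("/api/villages/spatial/hotspots/", "{hotspot_id}"),
--     ("/api/villages/spatial/integration/by-character/", "{character}"),
--     ("/api/villages/spatial/integration/by-cluster/", "{cluster_id}"),
-- ]
--
-- def _sorted_templates(
--     templates: Iterable[tuple[str, str]],
-- ) -> list[tuple[str, str]]:
--     return sorted(templates, key=lambda item: len(item[0]), reverse=True)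
--
-- def normalize_route_path(path: str) -> str:
--     """Normalize a concrete request path into a route template when possible."""
--     for prefix, param_template in _sorted_templates(PATH_TEMPLATES):
--         if not path.startswith(prefix):
--             continue
--
--         suffix = path[len(prefix):]
--         if not suffix:
--             return path
--
--         template_segments = param_template.split("/")
--         suffix_segments = suffix.split("/")
--         if len(suffix_segments) < len(template_segments):
--             return path
--
--         rest_segments = suffix_segments[len(template_segments):]
--         if rest_segments:
--             return f"{prefix}{param_template}/{'/'.join(rest_segments)}"
--
--         return f"{prefix}{param_template}"
--
--     return path
-- ===== SOURCE B (Python) =====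
-- PATH_TEMPLATES: list[tuple[str, str]] = [
--     ("/admin/sessions/user/", "{user_id}"),
--     ("/admin/sessions/revoke-user/", "{user_id}"),
--     ("/admin/sessions/revoke/", "{token_id}"),
--     ("/admin/user-sessions/user/", "{user_id}"),
--     ("/admin/user-sessions/revoke-user/", "{user_id}"),
--     ("/admin/user-sessions/", "{session_id}"),
--     ("/admin/ip/", "{api_name}/{ip}"),
--     ("/api/tools/check/download/", "{task_id}"),
--     ("/api/tools/jyut2ipa/download/", "{task_id}"),
--     ("/api/tools/jyut2ipa/progress/", "{task_id}"),
--     ("/api/tools/merge/download/", "{task_id}"),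
--     ("/api/tools/merge/progress/", "{task_id}"),
--     ("/api/tools/praat/jobs/progress/", "{job_id}"),
--     ("/api/tools/praat/uploads/progress/", "{task_id}"),
--     ("/api/villages/admin/run-ids/active/", "{analysis_type}"),
--     ("/api/villages/admin/run-ids/available/", "{analysis_type}"),
--     ("/api/villages/admin/run-ids/metadata/", "{run_id}"),
--     ("/api/villages/village/complete/", "{village_id}"),
--     ("/api/villages/village/features/", "{village_id}"),
--     ("/api/villages/village/ngrams/", "{village_id}"),
--     ("/api/villages/village/semantic-structure/", "{village_id}"),
--     ("/api/villages/village/spatial-features/", "{village_id}"),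
--     ("/api/villages/semantic/subcategory/chars/", "{subcategory}"),
--     ("/api/villages/spatial/hotspots/", "{hotspot_id}"),
--     ("/api/villages/spatial/integration/by-character/", "{character}"),
--     ("/api/villages/spatial/integration/by-cluster/", "{cluster_id}"),
-- ]
--
--
-- def normalize_route_path(path: str) -> str:
--     """Normalize a concrete request path into a route template when possible."""
--     # single pass: keep the longest matching prefix seen so far (no sort)
--     best = None
--     for item in PATH_TEMPLATES:
--         if path.startswith(item[0]) and (best is None or len(item[0]) > len(best[0])):
--             best = item
--     if best is None:
--         return path
--
--     prefix, param_template = best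
--     suffix = path[len(prefix):]
--     if not suffix:
--         return path
--
--     # the template has param_template.count("/") + 1 segments
--     k = param_template.count("/") + 1
--     suffix_segments = suffix.split("/")
--     if len(suffix_segments) < k:
--         return path
--
--     # one join rebuilds both the "with rest" and the "exact" case
--     return prefix + "/".join([param_template] + suffix_segments[k:])
-- ===== Notes on version B (the rewrite author's own statement) =====
-- stated objective: alternative
-- what changed: Replaces A's per-call descending sort plus first-match scan and split/slice/f-string rebuild by a single best-so-far selection pass over the templates and a count-based rebuild: the template segment count is its slash count plus one, and one join of the template with the leftover segments produces both output shapes.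
import Mathlib
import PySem

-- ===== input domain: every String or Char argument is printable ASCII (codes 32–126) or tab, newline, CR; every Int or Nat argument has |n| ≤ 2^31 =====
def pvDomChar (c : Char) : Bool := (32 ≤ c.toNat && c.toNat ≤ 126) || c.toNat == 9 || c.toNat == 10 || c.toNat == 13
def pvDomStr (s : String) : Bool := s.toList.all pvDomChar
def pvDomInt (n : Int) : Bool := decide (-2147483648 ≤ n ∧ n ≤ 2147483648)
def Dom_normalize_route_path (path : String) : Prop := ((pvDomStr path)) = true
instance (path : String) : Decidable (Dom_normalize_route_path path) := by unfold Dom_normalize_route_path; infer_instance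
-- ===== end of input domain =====

-- B replaces A's per-call descending sort + first-match scan + split/slice/f-string rebuild by a
-- single best-so-far selection loop over the templates and a count-based rebuild (template segment
-- count = param_template.count('/') + 1, one '/'.join([param_template] + rest) for both shapes).

-- the module constant PATH_TEMPLATES (strings as List Char for kernel-transparent string work)
def pathTemplates : List (List Char × List Char) := [
  ("/admin/sessions/user/".toList, "{user_id}".toList),
  ("/admin/sessions/revoke-user/".toList, "{user_id}".toList),
  ("/admin/sessions/revoke/".toList, "{token_id}".toList),
  ("/admin/user-sessions/user/".toList, "{user_id}".toList),
  ("/admin/user-sessions/revoke-user/".toList, "{user_id}".toList),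
  ("/admin/user-sessions/".toList, "{session_id}".toList),
  ("/admin/ip/".toList, "{api_name}/{ip}".toList),
  ("/api/tools/check/download/".toList, "{task_id}".toList),
  ("/api/tools/jyut2ipa/download/".toList, "{task_id}".toList),
  ("/api/tools/jyut2ipa/progress/".toList, "{task_id}".toList),
  ("/api/tools/merge/download/".toList, "{task_id}".toList),
  ("/api/tools/merge/progress/".toList, "{task_id}".toList),
  ("/api/tools/praat/jobs/progress/".toList, "{job_id}".toList),
  ("/api/tools/praat/uploads/progress/".toList, "{task_id}".toList),
  ("/api/villages/admin/run-ids/active/".toList, "{analysis_type}".toList),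
  ("/api/villages/admin/run-ids/available/".toList, "{analysis_type}".toList),
  ("/api/villages/admin/run-ids/metadata/".toList, "{run_id}".toList),
  ("/api/villages/village/complete/".toList, "{village_id}".toList),
  ("/api/villages/village/features/".toList, "{village_id}".toList),
  ("/api/villages/village/ngrams/".toList, "{village_id}".toList),
  ("/api/villages/village/semantic-structure/".toList, "{village_id}".toList),
  ("/api/villages/village/spatial-features/".toList, "{village_id}".toList),
  ("/api/villages/semantic/subcategory/chars/".toList, "{subcategory}".toList),
  ("/api/villages/spatial/hotspots/".toList, "{hotspot_id}".toList),
  ("/api/villages/spatial/integration/by-character/".toList, "{character}".toList),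
  ("/api/villages/spatial/integration/by-cluster/".toList, "{cluster_id}".toList)]

-- ===== PORT A =====
-- A's loop body after 'if not path.startswith(prefix): continue' (split, length check, slice, f-strings)
def pvApplyA (pre tmpl p : List Char) : List Char :=
  let suffix := PySem.List.slice p (some (pre.length : Int)) none
  if suffix = [] then p
  else
    let template_segments := PySem.Chars.splitOn tmpl "/".toList
    let suffix_segments := PySem.Chars.splitOn suffix "/".toList
    if suffix_segments.length < template_segments.length then p
    else
      let rest_segments := PySem.List.slice suffix_segments (some (template_segments.length : Int)) none
      if rest_segments ≠ [] then pre ++ tmpl ++ "/".toList ++ PySem.Chars.join "/".toList rest_segments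
      else pre ++ tmpl

-- A's for-loop over the sorted templates: first matching prefix wins
def pvLoopA : List (List Char × List Char) → List Char → List Char
  | [], p => p
  | (pre, tmpl) :: rest, p =>
    if ¬ PySem.Chars.startswith p pre then pvLoopA rest p
    else pvApplyA pre tmpl p

def normalize_route_path (path : String) : String :=
  String.ofList
    (pvLoopA (PySem.List.sorted pathTemplates (fun item => item.1.length) true) path.toList)

-- ===== PORT B =====
-- B's selection loop: 'best = item' whenever item's prefix matches and is strictly longer
def pvStepB (p : List Char) (acc : Option (List Char × List Char))
    (item : List Char × List Char) : Option (List Char × List Char) :=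
  if PySem.Chars.startswith p item.1 &&
      (match acc with | none => true | some b => decide (b.1.length < item.1.length)) then
    some item
  else acc

def pvBestB (p : List Char) : Option (List Char × List Char) :=
  pathTemplates.foldl (pvStepB p) none

-- B's rebuild: template segment count by counting '/', one join for both output shapes
def pvRebuildB (pre tmpl p : List Char) : List Char :=
  let suffix := PySem.List.slice p (some (pre.length : Int)) none
  if suffix = [] then p
  else
    let k := PySem.Chars.count tmpl "/".toList + 1
    let suffix_segments := PySem.Chars.splitOn suffix "/".toList
    if suffix_segments.length < k then p
    else pre ++ PySem.Chars.join "/".toList ([tmpl] ++ PySem.List.slice suffix_segments (some ((k : Nat) : Int)) none)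

def normalize_route_path_alt (path : String) : String :=
  match pvBestB path.toList with
  | none => path
  | some best => String.ofList (pvRebuildB best.1 best.2 path.toList)

-- ===== PRECONDITION & SPEC =====
def Spec_normalize_route_path (path : String) (out : String) : Prop := out = normalize_route_path_alt path
instance (path : String) (out : String) : Decidable (Spec_normalize_route_path path out) := by unfold Spec_normalize_route_path; infer_instance

-- ===== CLAIM (what is proved, stated in full; the proofs are below) =====
def Claim_equal_normalize_route_path : Prop := ∀ (path : String), Dom_normalize_route_path path → Spec_normalize_route_path path (normalize_route_path path)

-- ===== LEMMAS AND PROOFS =====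

-- A's loop is "apply the first template whose prefix matches"
theorem pvLoopA_eq_find (l : List (List Char × List Char)) (p : List Char) :
    pvLoopA l p =
      match l.find? (fun item => PySem.Chars.startswith p item.1) with
      | some t => pvApplyA t.1 t.2 p
      | none => p := by
  induction l with
  | nil => rfl
  | cons t rest ih =>
    obtain ⟨pre, tmpl⟩ := t
    by_cases h : PySem.Chars.startswith p pre = true <;>
      simp [pvLoopA, h, ih]

-- in a list sorted by descending key, the first match has the greatest key among all matches
theorem pvDescFindMax {α : Type} (key : α → Nat) (pred : α → Bool) (m : α) :
    ∀ (s : List α), s.Pairwise (fun a b => key b ≤ key a) →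
    s.find? pred = some m → ∀ x ∈ s, pred x = true → key x ≤ key m := by
  intro s
  induction s with
  | nil => intro _ h; simp at h
  | cons a s ih =>
    intro hpw hfind x hx hpred
    rcases List.pairwise_cons.mp hpw with ⟨ha, hpw'⟩
    by_cases hpa : pred a = true
    · rw [List.find?_cons] at hfind
      simp only [hpa] at hfind
      have hma : a = m := by simpa using hfind
      subst hma
      cases hx with
      | head => exact le_refl _
      | tail _ hx => exact ha x hx
    · rw [List.find?_cons] at hfind
      simp only [Bool.not_eq_true] at hpa
      rw [hpa] at hfind
      cases hx with
      | head => rw [hpa] at hpred; exact absurd hpred (by simp)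
      | tail _ hx => exact ih hpw' hfind x hx hpred

-- one step of B's loop: it keeps the accumulator or stores the current item (which then matched)
theorem pvStepB_out (p : List Char) (acc : Option (List Char × List Char))
    (x : List Char × List Char) :
    pvStepB p acc x = acc ∨
      (pvStepB p acc x = some x ∧ PySem.Chars.startswith p x.1 = true) := by
  unfold pvStepB
  by_cases h : (PySem.Chars.startswith p x.1 &&
      (match acc with | none => true | some b => decide (b.1.length < x.1.length))) = true
  · exact Or.inr ⟨if_pos h, Bool.and_elim_left h⟩
  · exact Or.inl (if_neg h)

-- one step from a stored best: unchanged, or replaced by a strictly longer prefix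
theorem pvStepB_from_some (p : List Char) (c x : List Char × List Char) :
    pvStepB p (some c) x = some c ∨
      (pvStepB p (some c) x = some x ∧ c.1.length < x.1.length) := by
  rcases pvStepB_out p (some c) x with h | ⟨h, hpx⟩
  · exact Or.inl h
  · by_cases hlt : c.1.length < x.1.length
    · exact Or.inr ⟨h, hlt⟩
    · left
      unfold pvStepB
      rw [if_neg]
      simp [hlt]

-- one step on a matching item yields a stored best at least as long as the item
theorem pvStepB_dominates (p : List Char) (acc : Option (List Char × List Char))
    (x : List Char × List Char) (hpx : PySem.Chars.startswith p x.1 = true) :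
    ∃ y, pvStepB p acc x = some y ∧ x.1.length ≤ y.1.length := by
  unfold pvStepB
  cases acc with
  | none => exact ⟨x, by simp [hpx], le_refl _⟩
  | some b =>
    by_cases hb : b.1.length < x.1.length
    · exact ⟨x, by simp [hpx, hb], le_refl _⟩
    · exact ⟨b, by simp [hpx, hb], by omega⟩

-- B's fold never shrinks a stored best: the result dominates any accumulator
theorem pvStepB_mono (p : List Char) :
    ∀ (l : List (List Char × List Char)) (c m : List Char × List Char),
    l.foldl (pvStepB p) (some c) = some m → c.1.length ≤ m.1.length := by
  intro l
  induction l with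
  | nil =>
    intro c m h
    simp only [List.foldl_nil, Option.some.injEq] at h
    exact h ▸ le_refl _
  | cons x l ih =>
    intro c m h
    simp only [List.foldl_cons] at h
    rcases pvStepB_from_some p c x with hs | ⟨hs, hlt⟩
    · rw [hs] at h; exact ih c m h
    · rw [hs] at h; exact le_trans (le_of_lt hlt) (ih x m h)

-- a fold from a stored best never returns none
theorem pvStepB_ne_none (p : List Char) :
    ∀ (l : List (List Char × List Char)) (c : List Char × List Char),
    l.foldl (pvStepB p) (some c) ≠ none := by
  intro l
  induction l with
  | nil => intro c; simp
  | cons x l ih =>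
    intro c
    simp only [List.foldl_cons]
    rcases pvStepB_from_some p c x with hs | ⟨hs, _⟩ <;> rw [hs]
    · exact ih c
    · exact ih x

-- the fold's result, when some, is a matching element of the list (unless it was the accumulator)
theorem pvStepB_sound (p : List Char) :
    ∀ (l : List (List Char × List Char)) (acc : Option (List Char × List Char))
      (m : List Char × List Char),
    l.foldl (pvStepB p) acc = some m →
    acc = some m ∨ (m ∈ l ∧ PySem.Chars.startswith p m.1 = true) := by
  intro l
  induction l with
  | nil => intro acc m h; exact Or.inl h
  | cons x l ih =>
    intro acc m h
    simp only [List.foldl_cons] at h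
    rcases pvStepB_out p acc x with hs | ⟨hs, hpx⟩
    · rw [hs] at h
      rcases ih acc m h with h1 | h1
      · exact Or.inl h1
      · exact Or.inr ⟨List.mem_cons_of_mem _ h1.1, h1.2⟩
    · rw [hs] at h
      rcases ih (some x) m h with h1 | h1
      · have hx : x = m := by simpa using h1
        subst hx
        exact Or.inr ⟨List.mem_cons_self, hpx⟩
      · exact Or.inr ⟨List.mem_cons_of_mem _ h1.1, h1.2⟩

-- the fold's result dominates every matching element of the list
theorem pvStepB_max (p : List Char) :
    ∀ (l : List (List Char × List Char)) (acc : Option (List Char × List Char))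
      (m : List Char × List Char),
    l.foldl (pvStepB p) acc = some m →
    ∀ x ∈ l, PySem.Chars.startswith p x.1 = true → x.1.length ≤ m.1.length := by
  intro l
  induction l with
  | nil => intro acc m _ x hx; simp at hx
  | cons a l ih =>
    intro acc m h x hx hpx
    simp only [List.foldl_cons] at h
    cases hx with
    | tail _ hx => exact ih _ m h x hx hpx
    | head =>
      obtain ⟨y, hy, hxy⟩ := pvStepB_dominates p acc a hpx
      rw [hy] at h
      exact le_trans hxy (pvStepB_mono p l y m h)

-- if the fold returns none, no element matched
theorem pvStepB_none (p : List Char) :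
    ∀ (l : List (List Char × List Char)),
    l.foldl (pvStepB p) none = none →
    ∀ x ∈ l, PySem.Chars.startswith p x.1 = false := by
  intro l
  induction l with
  | nil => intro _ x hx; simp at hx
  | cons a l ih =>
    intro h x hx
    simp only [List.foldl_cons] at h
    cases hpa : PySem.Chars.startswith p a.1 with
    | true =>
      exfalso
      have hstep : pvStepB p none a = some a := by unfold pvStepB; simp [hpa]
      rw [hstep] at h
      exact pvStepB_ne_none p l a h
    | false =>
      have hstep : pvStepB p none a = none := by unfold pvStepB; simp [hpa]
      rw [hstep] at h
      cases hx with
      | head => exact hpa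
      | tail _ hx => exact ih h x hx

-- no two templates share a prefix string
theorem pvFstInj : ∀ a ∈ pathTemplates, ∀ b ∈ pathTemplates, a.1 = b.1 → a = b := by decide

-- two matching prefixes of equal length are the same template
theorem pvUniq (p : List Char) (m : List Char × List Char) (hm : m ∈ pathTemplates)
    (hpm : PySem.Chars.startswith p m.1 = true) :
    ∀ x ∈ pathTemplates, PySem.Chars.startswith p x.1 = true → x.1.length = m.1.length → x = m := by
  intro x hx hpx hlen
  have h1 : x.1 <+: p := (PySem.Chars.startswith_iff p x.1).mp hpx
  have h2 : m.1 <+: p := (PySem.Chars.startswith_iff p m.1).mp hpm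
  have : x.1 = m.1 := by
    rcases List.prefix_or_prefix_of_prefix h1 h2 with h | h
    · exact h.eq_of_length hlen
    · exact (h.eq_of_length hlen.symm).symm
  exact pvFstInj x hx m hm this

-- each template's split-segment count equals its '/'-count plus one
theorem pvSegCount : ∀ item ∈ pathTemplates,
    (PySem.Chars.splitOn item.2 "/".toList).length =
      PySem.Chars.count item.2 "/".toList + 1 := by decide

-- with that count fact, A's rebuild and B's rebuild agree
theorem pvApplyA_eq_rebuildB (pre tmpl p : List Char)
    (hk : (PySem.Chars.splitOn tmpl "/".toList).length =
      PySem.Chars.count tmpl "/".toList + 1) :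
    pvApplyA pre tmpl p = pvRebuildB pre tmpl p := by
  have hsl : ("/" : String).toList = ['/'] := rfl
  rw [hsl] at hk
  unfold pvApplyA pvRebuildB
  simp only [hsl, ← hk]
  by_cases h0 : p.length ≤ pre.length
  · simp [h0]
  · by_cases h1 : (PySem.Chars.splitOn (List.drop pre.length p) ['/']).length <
        (PySem.Chars.splitOn tmpl ['/']).length
    · simp [h0, h1]
    · cases hrest : List.drop (PySem.Chars.splitOn tmpl ['/']).length
          (PySem.Chars.splitOn (List.drop pre.length p) ['/']) with
      | nil => simp [h0, h1, hrest, PySem.Chars.join_singleton]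
      | cons r rs => simp [h0, h1, hrest, PySem.Chars.join_cons_cons]

-- ===== VERDICT (by name: the statement is the Claim_ definition above) =====
theorem normalize_route_path_spec : Claim_equal_normalize_route_path := by
  intro path _
  show normalize_route_path path = normalize_route_path_alt path
  unfold normalize_route_path normalize_route_path_alt pvBestB
  set p := path.toList with hp
  set pred : List Char × List Char → Bool := fun item => PySem.Chars.startswith p item.1 with hpred
  rw [pvLoopA_eq_find]
  cases hB : pathTemplates.foldl (pvStepB p) none with
  | none =>
    have hno := pvStepB_none p pathTemplates hB
    have hfind : (PySem.List.sorted pathTemplates (fun item => item.1.length) true).find? pred = none := by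
      rw [List.find?_eq_none]
      intro x hx
      have : x ∈ pathTemplates :=
        (PySem.List.sorted_perm pathTemplates (fun item => item.1.length) true).mem_iff.mp hx
      simp [hpred, hno x this]
    rw [hfind]
    exact String.ofList_toList
  | some m =>
    have hm : m ∈ pathTemplates ∧ pred m = true := by
      rcases pvStepB_sound p pathTemplates none m hB with h | h
      · exact absurd h (by simp)
      · exact h
    have hmax := pvStepB_max p pathTemplates none m hB
    -- A's find? on the sorted list succeeds and returns the same template
    have hperm := PySem.List.sorted_perm pathTemplates (fun item => item.1.length) true
    cases hfind : (PySem.List.sorted pathTemplates (fun item => item.1.length) true).find? pred with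
    | none =>
      exfalso
      have := List.find?_eq_none.mp hfind m (hperm.mem_iff.mpr hm.1)
      exact this hm.2
    | some m' =>
      have hpm' : pred m' = true := List.find?_some hfind
      have hm'L : m' ∈ pathTemplates :=
        hperm.mem_iff.mp (List.mem_of_find?_eq_some hfind)
      have h1 : m.1.length ≤ m'.1.length :=
        pvDescFindMax (fun item => item.1.length) pred m' _
          (PySem.List.sorted_pairwise_rev _ _) hfind m (hperm.mem_iff.mpr hm.1) hm.2
      have h2 : m'.1.length ≤ m.1.length := hmax m' hm'L hpm'
      have hmm : m' = m := pvUniq p m hm.1 hm.2 m' hm'L hpm' (by omega)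
      subst hmm
      exact congrArg String.ofList
        (pvApplyA_eq_rebuildB m'.1 m'.2 p (pvSegCount m' hm'L))
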